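-- pv_equiv track=rewrite | github.com/sarveshkapre/devex-agent | src/devex_agent/generator.py | _pick_accept_content_type
-- ===== SOURCE A (Python) =====
-- from typing import Any, cast
--
-- def _pick_content_type(content: dict[str, Any]) -> str:
--     if not content:
--         return ""
--     if "application/json" in content:
--         return "application/json"
--     return next(iter(content))
--
-- def _pick_accept_content_type(responses: dict[str, Any]) -> str:
--     for status in sorted(responses.keys()):
--         response = responses[status]
--         content = response.get("content", {}) or {}
--         content_type = _pick_content_type(content)
--         if content_type:
--             return content_type
--     return ""
-- ===== SOURCE B (Python) =====
-- def _pick_content_type(content):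
--     if not content:
--         return ""
--     if "application/json" in content:
--         return "application/json"
--     return next(iter(content))
--
--
-- def _pick_accept_content_type(responses):
--     best = None
--     for status, response in responses.items():
--         content = response.get("content", {}) or {}
--         content_type = _pick_content_type(content)
--         if content_type and (best is None or status < best[0]):
--             best = (status, content_type)
--     return best[1] if best else ""
-- ===== Notes on version B (the rewrite author's own statement) =====
-- stated objective: alternative
-- what changed: Replaces A's sort of all status keys followed by a scan with early return by a single pass over responses.items() that tracks the qualifying (status, content type) pair with the lexicographically smallest status, removing the sort.
import Mathlib
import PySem

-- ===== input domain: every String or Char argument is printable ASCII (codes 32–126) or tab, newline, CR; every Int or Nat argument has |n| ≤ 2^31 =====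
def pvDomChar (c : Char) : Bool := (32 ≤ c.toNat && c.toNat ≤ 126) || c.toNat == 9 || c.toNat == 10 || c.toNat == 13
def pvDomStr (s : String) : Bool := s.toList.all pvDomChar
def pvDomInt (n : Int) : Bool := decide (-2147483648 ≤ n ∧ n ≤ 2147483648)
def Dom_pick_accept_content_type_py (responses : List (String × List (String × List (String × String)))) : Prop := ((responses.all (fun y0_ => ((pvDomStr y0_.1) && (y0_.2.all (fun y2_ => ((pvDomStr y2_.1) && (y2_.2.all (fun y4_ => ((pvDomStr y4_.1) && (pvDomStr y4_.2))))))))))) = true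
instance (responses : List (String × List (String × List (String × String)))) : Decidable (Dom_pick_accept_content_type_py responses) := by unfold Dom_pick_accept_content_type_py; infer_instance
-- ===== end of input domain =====

-- B replaces A's sort-then-scan-with-early-return by a single pass over the items
-- that tracks the qualifying entry with the smallest status key (objective: alternative).

-- ===== PORT A =====
-- _pick_content_type (module helper, identical in A and B)
def pvPickContentType (content : PySem.Dict String String) : String :=
  if content.items = [] then ""
  else if content.contains "application/json" then "application/json"
  else content.keys.headD ""   -- next(iter(content)): first key (list is nonempty here)

-- response.get("content", {}) or {}  (empty dict falsy, so `or {}` is the identity here)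
def pvContentOf (response : List (String × List (String × String))) : PySem.Dict String String :=
  PySem.Dict.ofList ((PySem.Dict.ofList response).getD "content" [])

-- A's loop over sorted(responses.keys()) with early return
def pvLoopA (d : PySem.Dict String (List (String × List (String × String)))) : List String → String
  | [] => ""
  | s :: rest =>
    let content_type := pvPickContentType (pvContentOf ((d.get? s).getD []))
    if content_type = "" then pvLoopA d rest else content_type

def pick_accept_content_type_py (responses : List (String × List (String × List (String × String)))) : String :=
  let d := PySem.Dict.ofList responses
  pvLoopA d (PySem.List.sorted d.keys (fun k => k) false)

-- ===== PORT B =====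
-- B's loop body: keep the qualifying (status, content_type) with the smallest status
def pvStepB (best : Option (String × String))
    (p : String × List (String × List (String × String))) : Option (String × String) :=
  let content_type := pvPickContentType (pvContentOf p.2)
  if content_type = "" then best
  else match best with
    | none => some (p.1, content_type)
    | some b => if p.1 < b.1 then some (p.1, content_type) else some b

def pick_accept_content_type_py_alt (responses : List (String × List (String × List (String × String)))) : String :=
  let d := PySem.Dict.ofList responses
  match d.items.foldl pvStepB none with
  | some b => b.2
  | none => ""

-- ===== PRECONDITION & SPEC =====
def Spec_pick_accept_content_type_py (responses : List (String × List (String × List (String × String)))) (out : String) : Prop := out = pick_accept_content_type_py_alt responses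
instance (responses : List (String × List (String × List (String × String)))) (out : String) : Decidable (Spec_pick_accept_content_type_py responses out) := by unfold Spec_pick_accept_content_type_py; infer_instance

-- ===== CLAIM (what is proved, stated in full; the proofs are below) =====
def Claim_equal_pick_accept_content_type_py : Prop := ∀ (responses : List (String × List (String × List (String × String)))), Dom_pick_accept_content_type_py responses → Spec_pick_accept_content_type_py responses (pick_accept_content_type_py responses)

-- ===== LEMMAS AND PROOFS =====

-- the content type associated to a status key (proof-side abbreviation)
def pvQ (d : PySem.Dict String (List (String × List (String × String)))) (s : String) : String :=
  pvPickContentType (pvContentOf ((d.get? s).getD []))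

-- the content type associated to an item (proof-side abbreviation)
def pvCT (p : String × List (String × List (String × String))) : String :=
  pvPickContentType (pvContentOf p.2)

lemma pvLoopA_eq_find (d : PySem.Dict String (List (String × List (String × String)))) :
    ∀ l : List String,
      pvLoopA d l = ((l.find? (fun s => pvQ d s != "")).map (pvQ d)).getD "" := by
  intro l
  induction l with
  | nil => rfl
  | cons s rest ih =>
    simp only [pvLoopA, List.find?_cons]
    rw [show pvPickContentType (pvContentOf ((d.get? s).getD [])) = pvQ d s from rfl]
    by_cases h : pvQ d s = ""
    · simp [h, ih]
    · have hb : (pvQ d s != "") = true := by simp [h]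
      rw [hb]; simp [h]

lemma pvFind_min {P : String → Bool} :
    ∀ l : List String, l.Pairwise (fun a b => a ≤ b) → ∀ s, l.find? P = some s →
      s ∈ l ∧ P s = true ∧ ∀ t ∈ l, P t = true → s ≤ t := by
  intro l
  induction l with
  | nil => intro _ s h; simp at h
  | cons a rest ih =>
    intro hpw s hfind
    rw [List.pairwise_cons] at hpw
    rw [List.find?_cons] at hfind
    by_cases hPa : P a = true
    · simp [hPa] at hfind
      subst hfind
      refine ⟨List.mem_cons_self, hPa, ?_⟩
      intro t ht _
      rcases List.mem_cons.mp ht with h | h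
      · exact le_of_eq h.symm
      · exact hpw.1 t h
    · simp [hPa] at hfind
      obtain ⟨hmem, hPs, hmin⟩ := ih hpw.2 s hfind
      refine ⟨List.mem_cons_of_mem _ hmem, hPs, ?_⟩
      intro t ht hPt
      rcases List.mem_cons.mp ht with h | h
      · subst h; exact absurd hPt hPa
      · exact hmin t h hPt

lemma pvStepB_skip {p : String × List (String × List (String × String))}
    (b : Option (String × String)) (hct : pvCT p = "") : pvStepB b p = b := by
  simp [pvStepB, pvCT] at hct ⊢; simp [hct]

lemma pvStepB_none {p : String × List (String × List (String × String))}
    (hct : pvCT p ≠ "") : pvStepB none p = some (p.1, pvCT p) := by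
  simp only [pvStepB, pvCT] at hct ⊢
  rw [if_neg hct]

lemma pvStepB_lt {p : String × List (String × List (String × String))}
    {x : String × String} (hct : pvCT p ≠ "") (hlt : p.1 < x.1) :
    pvStepB (some x) p = some (p.1, pvCT p) := by
  simp only [pvStepB, pvCT] at hct ⊢
  rw [if_neg hct, if_pos hlt]

lemma pvStepB_ge {p : String × List (String × List (String × String))}
    {x : String × String} (hct : pvCT p ≠ "") (hge : ¬ p.1 < x.1) :
    pvStepB (some x) p = some x := by
  simp only [pvStepB, pvCT] at hct ⊢
  rw [if_neg hct, if_neg hge]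

lemma pvFoldB_spec :
    ∀ (ps : List (String × List (String × List (String × String))))
      (b : Option (String × String)),
      (ps.foldl pvStepB b = none → b = none ∧ ∀ p ∈ ps, pvCT p = "") ∧
      (∀ r, ps.foldl pvStepB b = some r →
        (b = some r ∨ ∃ p ∈ ps, p.1 = r.1 ∧ pvCT p = r.2 ∧ r.2 ≠ "") ∧
        (∀ x, b = some x → r.1 ≤ x.1) ∧
        (∀ p ∈ ps, pvCT p ≠ "" → r.1 ≤ p.1)) := by
  intro ps
  induction ps with
  | nil =>
    intro b
    constructor
    · intro h; exact ⟨h, by simp⟩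
    · intro r h
      have hb : b = some r := h
      refine ⟨Or.inl hb, ?_, by simp⟩
      intro x hx; rw [hb] at hx; cases hx; exact le_refl _
  | cons p ps ih =>
    intro b
    have hstep : (p :: ps).foldl pvStepB b = ps.foldl pvStepB (pvStepB b p) := rfl
    have ih' := ih (pvStepB b p)
    constructor
    · intro h
      rw [hstep] at h
      obtain ⟨hb', hall⟩ := ih'.1 h
      by_cases hct : pvCT p = ""
      · rw [pvStepB_skip b hct] at hb'
        refine ⟨hb', ?_⟩
        intro q hq; rcases List.mem_cons.mp hq with h1 | h1
        · subst h1; exact hct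
        · exact hall q h1
      · exfalso
        cases b with
        | none => rw [pvStepB_none hct] at hb'; simp at hb'
        | some x =>
          by_cases hlt : p.1 < x.1
          · rw [pvStepB_lt hct hlt] at hb'; simp at hb'
          · rw [pvStepB_ge hct hlt] at hb'; simp at hb'
    · intro r h
      rw [hstep] at h
      obtain ⟨hsrc, hbnd, hqual⟩ := ih'.2 r h
      by_cases hct : pvCT p = ""
      · rw [pvStepB_skip b hct] at hsrc hbnd
        refine ⟨?_, hbnd, ?_⟩
        · rcases hsrc with h1 | ⟨q, hq, hrest⟩
          · exact Or.inl h1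
          · exact Or.inr ⟨q, List.mem_cons_of_mem _ hq, hrest⟩
        · intro q hq hqct
          rcases List.mem_cons.mp hq with h1 | h1
          · subst h1; exact absurd hct hqct
          · exact hqual q h1 hqct
      · refine ⟨?_, ?_, ?_⟩
        · -- source of r
          cases b with
          | none =>
            rw [pvStepB_none hct] at hsrc
            rcases hsrc with h1 | ⟨q, hq, hrest⟩
            · have h2 : (p.1, pvCT p) = r := Option.some.inj h1
              exact Or.inr ⟨p, List.mem_cons_self, by rw [← h2], by rw [← h2],
                by rw [← h2]; exact hct⟩
            · exact Or.inr ⟨q, List.mem_cons_of_mem _ hq, hrest⟩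
          | some x =>
            by_cases hlt : p.1 < x.1
            · rw [pvStepB_lt hct hlt] at hsrc
              rcases hsrc with h1 | ⟨q, hq, hrest⟩
              · have h2 : (p.1, pvCT p) = r := Option.some.inj h1
                exact Or.inr ⟨p, List.mem_cons_self, by rw [← h2], by rw [← h2],
                  by rw [← h2]; exact hct⟩
              · exact Or.inr ⟨q, List.mem_cons_of_mem _ hq, hrest⟩
            · rw [pvStepB_ge hct hlt] at hsrc
              rcases hsrc with h1 | ⟨q, hq, hrest⟩
              · exact Or.inl (by rw [h1])
              · exact Or.inr ⟨q, List.mem_cons_of_mem _ hq, hrest⟩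
        · -- bound wrt the incoming accumulator
          intro x hx
          subst hx
          by_cases hlt : p.1 < x.1
          · rw [pvStepB_lt hct hlt] at hbnd
            exact le_trans (hbnd _ rfl) (le_of_lt hlt)
          · rw [pvStepB_ge hct hlt] at hbnd
            exact hbnd _ rfl
        · -- bound over the qualifying items
          intro q hq hqct
          rcases List.mem_cons.mp hq with h1 | h1
          · subst h1
            cases b with
            | none =>
              rw [pvStepB_none hqct] at hbnd
              exact hbnd _ rfl
            | some x =>
              by_cases hlt : q.1 < x.1
              · rw [pvStepB_lt hqct hlt] at hbnd
                exact hbnd _ rfl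
              · rw [pvStepB_ge hqct hlt] at hbnd
                exact le_trans (hbnd _ rfl) (not_lt.mp hlt)
          · exact hqual q h1 hqct

-- a key of d corresponds to an item of d with the same content type
lemma pvKey_item (d : PySem.Dict String (List (String × List (String × String))))
    (hnd : d.keys.Nodup) (s : String) (hs : s ∈ d.keys) :
    ∃ p ∈ d.items, p.1 = s ∧ pvCT p = pvQ d s := by
  have h1 : d.get? s ≠ none := (not_iff_not.mpr (PySem.Dict.get?_eq_none_iff_not_mem_keys d s)).mpr (by simpa using hs)
  obtain ⟨v, hv⟩ := Option.ne_none_iff_exists'.mp h1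
  refine ⟨(s, v), PySem.Dict.mem_items_of_get?_eq_some d hv, rfl, ?_⟩
  simp [pvCT, pvQ, hv]

-- an item of d has the content type of its key
lemma pvItem_key (d : PySem.Dict String (List (String × List (String × String))))
    (hnd : d.keys.Nodup) (p : String × List (String × List (String × String)))
    (hp : p ∈ d.items) : pvCT p = pvQ d p.1 ∧ p.1 ∈ d.keys := by
  have hget : d.get? p.1 = some p.2 := PySem.Dict.get?_of_mem_items d hp hnd
  exact ⟨by simp [pvCT, pvQ, hget], PySem.Dict.mem_keys_of_mem_items d hp⟩

-- ===== VERDICT (by name: the statement is the Claim_ definition above) =====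
theorem pick_accept_content_type_py_spec : Claim_equal_pick_accept_content_type_py := by
  intro responses _
  unfold Spec_pick_accept_content_type_py pick_accept_content_type_py pick_accept_content_type_py_alt
  set d := PySem.Dict.ofList responses with hd
  have hnd : d.keys.Nodup := PySem.Dict.nodup_keys_ofList responses
  set l := PySem.List.sorted d.keys (fun k => k) false with hl
  have hpw : l.Pairwise (fun a b => a ≤ b) := by
    simpa using PySem.List.sorted_pairwise d.keys (fun k => k)
  have hmeml : ∀ s, s ∈ l ↔ s ∈ d.keys := by
    intro s; rw [hl, PySem.List.mem_sorted]
  rw [pvLoopA_eq_find]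
  have hfold := pvFoldB_spec d.items none
  cases hfoldeq : d.items.foldl pvStepB none with
  | none =>
    obtain ⟨_, hall⟩ := hfold.1 hfoldeq
    cases hfindeq : l.find? (fun s => pvQ d s != "") with
    | none => simp [hfoldeq]
    | some s =>
      exfalso
      obtain ⟨hsl, hPs, _⟩ := pvFind_min l hpw s hfindeq
      obtain ⟨p, hp, _, hpct⟩ := pvKey_item d hnd s ((hmeml s).mp hsl)
      have : pvQ d s ≠ "" := by simpa using hPs
      exact this (hpct ▸ hall p hp)
  | some r =>
    obtain ⟨hsrc, _, hqual⟩ := hfold.2 r hfoldeq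
    rcases hsrc with h1 | ⟨p, hp, hkey, hct, hne⟩
    · simp at h1
    obtain ⟨hctq, hkmem⟩ := pvItem_key d hnd p hp
    have hqr : pvQ d r.1 ≠ "" := by rw [← hkey, ← hctq, hct]; exact hne
    cases hfindeq : l.find? (fun s => pvQ d s != "") with
    | none =>
      exfalso
      have := List.find?_eq_none.mp hfindeq r.1 ((hmeml r.1).mpr (hkey ▸ hkmem))
      simp [hqr] at this
    | some s =>
      obtain ⟨hsl, hPs, hmin⟩ := pvFind_min l hpw s hfindeq
      have hqs : pvQ d s ≠ "" := by simpa using hPs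
      -- s ≤ r.1
      have hsr : s ≤ r.1 := hmin r.1 ((hmeml r.1).mpr (hkey ▸ hkmem)) (by simpa using hqr)
      -- r.1 ≤ s
      obtain ⟨q, hq, hqkey, hqct⟩ := pvKey_item d hnd s ((hmeml s).mp hsl)
      have hrs : r.1 ≤ s := hqkey ▸ hqual q hq (by rw [hqct]; exact hqs)
      have hse : s = r.1 := le_antisymm hsr hrs
      have : pvQ d s = r.2 := by rw [hse, ← hkey, ← hctq, hct]
      simp [this, hfoldeq]
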